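-- pv_equiv track=rewrite | github.com/Yejun4911/Algorithm- | Python/Programmers/기능개발.py | solution
-- ===== SOURCE A (Python) =====
-- from collections import deque
--
-- def solution(progresses, speeds):
--     answer=[]
--     answer2=[]
--     pro=deque(progresses) # progresses -> queue
--     sp=deque(speeds)# speeds->queue
--
--     while(pro): # 각 progresses마다 작업 시간을 측정 100을 기점으로 시간을 측정
--         cnt=0
--         p=pro.popleft()
--         s=sp.popleft()
--         while(True):
--             if p<100: #100이 안넘으면 cnt+1로 일 수를 측정
--                 p+=s
--                 cnt+=1
--             else:
--                 break
--         answer.append(cnt)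
--
--     answer=deque(answer)
--
--     while(answer): # 걸린 시간을 queue를 이용하여 며칠째에 몇개의 기능이 배포되었는지 확인
--         cnt2=1
--         a=answer.popleft()
--         while(answer):
--             i=0
--             if a<answer[i]: #progresses를 비교하여 배포 시간을 고려
--                 break
--             else:
--                 cnt2+=1
--                 answer.popleft()
--             i+=1
--         answer2.append(cnt2)
--
--     return answer2
-- ===== SOURCE B (Python) =====
-- def solution(progresses, speeds):
--     days = [0 if p >= 100 else -(-(100 - p) // s) for p, s in zip(progresses, speeds)]
--     if not days:
--         return []
--     answer = []
--     leader = days[0]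
--     count = 1
--     for d in days[1:]:
--         if d <= leader:
--             count += 1
--         else:
--             answer.append(count)
--             leader = d
--             count = 1
--     answer.append(count)
--     return answer
-- ===== Notes on version B (the rewrite author's own statement) =====
-- stated objective: simpler
-- what changed: Replaces A's per-unit simulation while-loop with a closed-form ceiling division per feature, and A's nested queue-popping group loop with a single forward pass keeping a leader and a count.
import Mathlib
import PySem

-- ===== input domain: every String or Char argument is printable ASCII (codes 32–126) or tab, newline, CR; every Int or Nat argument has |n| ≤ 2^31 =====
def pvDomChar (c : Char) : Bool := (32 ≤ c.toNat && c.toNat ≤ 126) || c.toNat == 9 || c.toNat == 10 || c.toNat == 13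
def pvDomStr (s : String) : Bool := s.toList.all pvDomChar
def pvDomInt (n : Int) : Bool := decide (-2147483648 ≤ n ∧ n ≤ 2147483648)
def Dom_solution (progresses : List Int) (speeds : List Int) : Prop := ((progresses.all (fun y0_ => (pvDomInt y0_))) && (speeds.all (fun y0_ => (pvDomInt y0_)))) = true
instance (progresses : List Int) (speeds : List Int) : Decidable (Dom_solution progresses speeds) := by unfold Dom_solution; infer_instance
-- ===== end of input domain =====

-- A = days-per-feature then consecutive-deployment counts.  B replaces A's per-unit
-- simulation loop by a closed-form ceiling division and A's nested queue-popping group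
-- loop by a single forward pass with a leader value (objective: simpler).


-- ===== PORT A =====
-- A's inner `while True: if p < 100: p += s; cnt += 1 else break`.  The fuel
-- (100 - p).toNat is an upper bound on the iteration count whenever s ≥ 1 (each step
-- raises p by at least 1); on inputs where Python A diverges (p < 100 with s ≤ 0,
-- excluded by Pre_solution) the fuel runs out and the value is unclaimed.
def countLoop (s : Int) : Nat → Int → Int → Int
  | 0, _, cnt => cnt
  | n + 1, p, cnt => if p < 100 then countLoop s n (p + s) (cnt + 1) else cnt

-- A's first while: pop one progress and one speed, count days.  Python raises
-- IndexError when speeds runs out first; Pre_solution excludes that (value unclaimed).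
def phase1A : List Int → List Int → List Int
  | [], _ => []
  | _ :: _, [] => []
  | p :: ps, s :: ss => countLoop s (100 - p).toNat p 0 :: phase1A ps ss

-- A's inner second while: pop while the head is ≤ a, counting.
def innerPop (a : Int) (cnt2 : Int) : List Int → Int × List Int
  | [] => (cnt2, [])
  | x :: xs => if a < x then (cnt2, x :: xs) else innerPop a (cnt2 + 1) xs

theorem innerPop_len (a cnt2 : Int) (xs : List Int) :
    (innerPop a cnt2 xs).2.length ≤ xs.length := by
  induction xs generalizing cnt2 with
  | nil => simp [innerPop]
  | cons x xs ih =>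
      simp only [innerPop]
      split
      · simp
      · exact le_trans (ih _) (Nat.le_succ _)

-- A's outer second while over the queue of day-counts.
def phase2A : List Int → List Int
  | [] => []
  | a :: rest =>
      let r := innerPop a 1 rest
      r.1 :: phase2A r.2
termination_by l => l.length
decreasing_by
  simpa using Nat.lt_succ_of_le (innerPop_len a 1 rest)

def solution (progresses : List Int) (speeds : List Int) : List Int :=
  phase2A (phase1A progresses speeds)

-- ===== PORT B =====
-- closed-form days: 0 if p >= 100 else -(-(100 - p) // s)
def dayFor (p s : Int) : Int :=
  if p ≥ 100 then 0 else -(PySem.Int.floordiv (-(100 - p)) s)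

-- single forward pass: leader value and running group count
def groupB (leader count : Int) : List Int → List Int
  | [] => [count]
  | d :: ds => if d ≤ leader then groupB leader (count + 1) ds else count :: groupB d 1 ds

def solution_alt (progresses : List Int) (speeds : List Int) : List Int :=
  let days := (progresses.zip speeds).map (fun q => dayFor q.1 q.2)
  match days with
  | [] => []
  | a :: rest => groupB a 1 rest

-- ===== PRECONDITION & SPEC =====
-- Pre_ excludes exactly the inputs on which Python A does not return: it loops forever
-- when some feature has progress < 100 and speed ≤ 0, and raises IndexError when
-- speeds is shorter than progresses.
def Pre_solution (progresses : List Int) (speeds : List Int) : Prop :=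
  progresses.length ≤ speeds.length ∧
    ∀ q ∈ progresses.zip speeds, 100 ≤ q.1 ∨ 1 ≤ q.2
instance (progresses : List Int) (speeds : List Int) : Decidable (Pre_solution progresses speeds) := by unfold Pre_solution; infer_instance

def pvWitness_solution : List Int × List Int := ([93, 30, 55], [1, 30, 5])

def Spec_solution (progresses : List Int) (speeds : List Int) (out : List Int) : Prop := out = solution_alt progresses speeds
instance (progresses : List Int) (speeds : List Int) (out : List Int) : Decidable (Spec_solution progresses speeds out) := by unfold Spec_solution; infer_instance

-- ===== CLAIM (what is proved, stated in full; the proofs are below) =====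
def Claim_equal_solution : Prop := ∀ (progresses : List Int) (speeds : List Int), Dom_solution progresses speeds → Pre_solution progresses speeds → Spec_solution progresses speeds (solution progresses speeds)

-- ===== LEMMAS AND PROOFS =====

-- the counting loop computes cnt + ceil((100-p)/s) when s ≥ 1 and fuel suffices
theorem countLoop_eq (s : Int) (hs : 1 ≤ s) :
    ∀ (n : Nat) (p cnt : Int), 100 - p ≤ (n : Int) →
      countLoop s n p cnt = cnt + (if p ≥ 100 then 0 else -(PySem.Int.floordiv (-(100 - p)) s)) := by
  intro n
  induction n with
  | zero =>
      intro p cnt h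
      have : (100 : Int) ≤ p := by simpa using h
      simp [countLoop, this]
  | succ n ih =>
      intro p cnt h
      by_cases hp : p < 100
      · have hstep : 100 - (p + s) ≤ (n : Int) := by push_cast at h ⊢; omega
        simp only [countLoop, hp, if_pos]
        rw [ih (p + s) (cnt + 1) hstep]
        by_cases hdone : 100 ≤ p + s
        · have h1 : -(PySem.Int.floordiv (-(100 - p)) s) = 1 := by
            rw [PySem.Int.neg_floordiv_neg_eq_iff_of_pos (by omega)]
            constructor <;> omega
          simp only [ge_iff_le, hdone, if_pos, if_neg (by omega : ¬ (100 : Int) ≤ p), h1]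
          ring
        · have hb := (PySem.Int.neg_floordiv_neg_eq_iff_of_pos (a := 100 - (p + s)) (b := s)
            (q := -(PySem.Int.floordiv (-(100 - (p + s))) s)) (by omega)).mp rfl
          have h1 : -(PySem.Int.floordiv (-(100 - p)) s)
              = -(PySem.Int.floordiv (-(100 - (p + s))) s) + 1 := by
            rw [PySem.Int.neg_floordiv_neg_eq_iff_of_pos (by omega)]
            constructor <;> nlinarith [hb.1, hb.2]
          simp only [ge_iff_le, if_neg (by omega : ¬ (100 : Int) ≤ p + s),
            if_neg (by omega : ¬ (100 : Int) ≤ p), h1]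
          ring
      · have h100 : (100 : Int) ≤ p := by omega
        simp [countLoop, hp, h100]

-- phase 1 equals B's zip-map of the closed form, under the precondition
theorem phase1A_eq : ∀ (ps ss : List Int), ps.length ≤ ss.length →
    (∀ q ∈ ps.zip ss, 100 ≤ q.1 ∨ 1 ≤ q.2) →
    phase1A ps ss = (ps.zip ss).map (fun q => dayFor q.1 q.2) := by
  intro ps
  induction ps with
  | nil => intro ss _ _; simp [phase1A]
  | cons p ps ih =>
      intro ss hlen hpre
      cases ss with
      | nil => simp at hlen
      | cons s ss =>
          have hq : 100 ≤ p ∨ 1 ≤ s := hpre (p, s) (by simp)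
          have hrest := ih ss (by simpa using hlen) (fun q hq => hpre q (by simp [hq]))
          simp only [phase1A, List.zip_cons_cons, List.map_cons, hrest]
          congr 1
          rcases hq with hp | hs
          · cases hfuel : (100 - p).toNat with
            | zero => simp [countLoop, dayFor, hp]
            | succ n =>
                have hnp : ¬ p < 100 := by omega
                simp [countLoop, dayFor, hp, hnp]
          · rw [countLoop_eq s hs ((100 - p).toNat) p 0 (by omega)]
            simp [dayFor]

-- B's forward pass equals A's pop-based grouping
theorem groupB_eq : ∀ (xs : List Int) (a c : Int),
    groupB a c xs = (innerPop a c xs).1 :: phase2A (innerPop a c xs).2 := by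
  intro xs
  induction xs with
  | nil => intro a c; simp [groupB, innerPop, phase2A]
  | cons x xs ih =>
      intro a c
      by_cases hx : x ≤ a
      · simp only [groupB, innerPop, if_pos hx, if_neg (by omega : ¬ a < x)]
        exact ih a (c + 1)
      · simp only [groupB, innerPop, if_neg hx, if_pos (by omega : a < x)]
        rw [phase2A]
        exact congrArg _ (ih x 1)

-- ===== VERDICT (by name: the statement is the Claim_ definition above) =====
theorem solution_spec : Claim_equal_solution := by
  intro ps ss _ hpre
  unfold Spec_solution solution solution_alt
  rw [phase1A_eq ps ss hpre.1 hpre.2]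
  cases h : (ps.zip ss).map (fun q => dayFor q.1 q.2) with
  | nil => simp [phase2A]
  | cons a rest =>
      rw [phase2A]
      exact (groupB_eq rest a 1).symm
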